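-- pv_equiv track=rewrite | github.com/orsaada/VisualizePrep | BussinesLayer/Algorithms/Visualize/mg/py3loader/algorithm.py | faces_shots_verification
-- ===== SOURCE A (Python) =====
-- def faces_shots_verification(shots, prev_face_end, cur_face_start, cur_face_end, next_face_start):
--     for (shot_start, shot_end) in shots:
--         if shot_start < prev_face_end <= cur_face_start < shot_end:
--             for(shot_start_2, shot_end_2) in shots:
--                 if shot_start_2 < cur_face_end <= next_face_start < shot_end_2:
--                     return True
--             return False
--     return False
-- ===== SOURCE B (Python) =====
-- def faces_shots_verification(shots, prev_face_end, cur_face_start, cur_face_end, next_face_start):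
--     # Single pass: accumulate both existence flags in one traversal.
--     found_first = False
--     found_second = False
--     for (ss, se) in shots:
--         found_first = found_first or (ss < prev_face_end <= cur_face_start < se)
--         found_second = found_second or (ss < cur_face_end <= next_face_start < se)
--     return found_first and found_second
-- ===== Notes on version B (the rewrite author's own statement) =====
-- stated objective: simpler
-- what changed: Replaced the nested loops with early returns (full inner rescan at the first outer match) by a single pass over shots that accumulates both existence flags simultaneously and conjoins them at the end.
import Mathlib
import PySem

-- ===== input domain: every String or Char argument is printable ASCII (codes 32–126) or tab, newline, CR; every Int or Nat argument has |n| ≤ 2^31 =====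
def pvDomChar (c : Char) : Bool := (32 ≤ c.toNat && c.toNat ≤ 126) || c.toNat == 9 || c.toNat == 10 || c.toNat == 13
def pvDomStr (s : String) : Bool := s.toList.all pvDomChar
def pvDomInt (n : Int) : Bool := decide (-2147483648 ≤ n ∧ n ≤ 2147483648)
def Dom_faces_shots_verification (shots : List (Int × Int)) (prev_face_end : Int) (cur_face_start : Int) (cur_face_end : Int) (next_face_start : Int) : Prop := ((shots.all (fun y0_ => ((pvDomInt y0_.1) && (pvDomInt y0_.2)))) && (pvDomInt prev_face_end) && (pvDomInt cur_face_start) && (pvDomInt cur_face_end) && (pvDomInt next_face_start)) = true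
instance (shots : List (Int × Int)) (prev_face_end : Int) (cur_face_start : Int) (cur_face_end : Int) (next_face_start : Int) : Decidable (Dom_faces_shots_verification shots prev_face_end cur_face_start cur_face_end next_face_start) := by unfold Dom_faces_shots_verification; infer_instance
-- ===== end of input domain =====

-- B replaces A's nested early-return loops by one accumulating pass; objective: simpler.

-- ===== PORT A =====
-- A's inner loop over the full shots list, early return True / final False
def fsvInner (shots : List (Int × Int)) (cur_face_end : Int) (next_face_start : Int) : Bool :=
  match shots with
  | [] => false
  | (ss2, se2) :: rest =>
    if ss2 < cur_face_end ∧ cur_face_end ≤ next_face_start ∧ next_face_start < se2 then true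
    else fsvInner rest cur_face_end next_face_start

-- A's outer loop: on the first matching shot, run the inner loop over ALL shots and return its result
def fsvOuter (allShots rem : List (Int × Int)) (prev_face_end cur_face_start cur_face_end next_face_start : Int) : Bool :=
  match rem with
  | [] => false
  | (ss, se) :: rest =>
    if ss < prev_face_end ∧ prev_face_end ≤ cur_face_start ∧ cur_face_start < se then
      fsvInner allShots cur_face_end next_face_start
    else fsvOuter allShots rest prev_face_end cur_face_start cur_face_end next_face_start

def faces_shots_verification (shots : List (Int × Int)) (prev_face_end : Int) (cur_face_start : Int) (cur_face_end : Int) (next_face_start : Int) : Bool :=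
  fsvOuter shots shots prev_face_end cur_face_start cur_face_end next_face_start

-- ===== PORT B =====
-- B's single loop: fold over shots accumulating both flags (found_first, found_second)
def faces_shots_verification_alt (shots : List (Int × Int)) (prev_face_end : Int) (cur_face_start : Int) (cur_face_end : Int) (next_face_start : Int) : Bool :=
  let r := shots.foldl
    (fun (acc : Bool × Bool) (p : Int × Int) =>
      (acc.1 || decide (p.1 < prev_face_end ∧ prev_face_end ≤ cur_face_start ∧ cur_face_start < p.2),
       acc.2 || decide (p.1 < cur_face_end ∧ cur_face_end ≤ next_face_start ∧ next_face_start < p.2)))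
    (false, false)
  r.1 && r.2

-- ===== PRECONDITION & SPEC =====
def Spec_faces_shots_verification (shots : List (Int × Int)) (prev_face_end : Int) (cur_face_start : Int) (cur_face_end : Int) (next_face_start : Int) (out : Bool) : Prop := out = faces_shots_verification_alt shots prev_face_end cur_face_start cur_face_end next_face_start
instance (shots : List (Int × Int)) (prev_face_end : Int) (cur_face_start : Int) (cur_face_end : Int) (next_face_start : Int) (out : Bool) : Decidable (Spec_faces_shots_verification shots prev_face_end cur_face_start cur_face_end next_face_start out) := by unfold Spec_faces_shots_verification; infer_instance

-- ===== CLAIM =====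
def Claim_equal_faces_shots_verification : Prop := ∀ (shots : List (Int × Int)) (prev_face_end : Int) (cur_face_start : Int) (cur_face_end : Int) (next_face_start : Int), Dom_faces_shots_verification shots prev_face_end cur_face_start cur_face_end next_face_start → Spec_faces_shots_verification shots prev_face_end cur_face_start cur_face_end next_face_start (faces_shots_verification shots prev_face_end cur_face_start cur_face_end next_face_start)

-- ===== LEMMAS AND PROOFS =====
-- A's inner loop computes the existential over the second condition
theorem fsvInner_eq_any (shots : List (Int × Int)) (c n : Int) :
    fsvInner shots c n = shots.any (fun p => decide (p.1 < c ∧ c ≤ n ∧ n < p.2)) := by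
  induction shots with
  | nil => rfl
  | cons hd tl ih =>
    cases hd with
    | mk ss se =>
      simp only [fsvInner, List.any_cons, ih]
      split_ifs with h
      · simp [h]
      · simp [h]

-- A's outer loop returns (any cond_A over rem) && inner(allShots)
theorem fsvOuter_eq (allShots rem : List (Int × Int)) (p c ce ns : Int) :
    fsvOuter allShots rem p c ce ns
      = ((rem.any (fun q => decide (q.1 < p ∧ p ≤ c ∧ c < q.2)))
          && fsvInner allShots ce ns) := by
  induction rem with
  | nil => rfl
  | cons hd tl ih =>
    cases hd with
    | mk ss se =>
      simp only [fsvOuter, List.any_cons, ih]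
      split_ifs with h
      · simp [h]
      · simp [h]

-- B's fold computes the pair of existentials, starting from an arbitrary accumulator
theorem fsv_fold_eq (shots : List (Int × Int)) (p c ce ns : Int) (a b : Bool) :
    shots.foldl
      (fun (acc : Bool × Bool) (q : Int × Int) =>
        (acc.1 || decide (q.1 < p ∧ p ≤ c ∧ c < q.2),
         acc.2 || decide (q.1 < ce ∧ ce ≤ ns ∧ ns < q.2)))
      (a, b)
    = (a || shots.any (fun q => decide (q.1 < p ∧ p ≤ c ∧ c < q.2)),
       b || shots.any (fun q => decide (q.1 < ce ∧ ce ≤ ns ∧ ns < q.2))) := by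
  induction shots generalizing a b with
  | nil => simp
  | cons hd tl ih => rw [List.foldl_cons, ih]; simp [Bool.or_assoc]

-- ===== VERDICT =====
theorem faces_shots_verification_spec : Claim_equal_faces_shots_verification := by
  intro shots p c ce ns _
  unfold Spec_faces_shots_verification faces_shots_verification faces_shots_verification_alt
  rw [fsvOuter_eq, fsvInner_eq_any, fsv_fold_eq]
  simp
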